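-- pv_equiv track=rewrite | github.com/GiuseppeDiPalma/LazyCseq-LockFree-benchmak-generator | lazy-cseq2.0/analyze_trace.py | generate_queue_state
-- ===== SOURCE A (Python) =====
-- def generate_queue_state(state_list):
--    data_structure = []
--    for state in state_list:
--       if state == "delete":
--          if len(data_structure) == 0:
--             continue
--          del data_structure[len(data_structure)-1]
--       else:
--          data_structure.insert(0,state)
--    return data_structure
-- ===== SOURCE B (Python) =====
-- def generate_queue_state(state_list):
--     inserts = []
--     head = 0
--     for state in state_list:
--         if state == "delete":
--             if head < len(inserts):
--                 head += 1
--         else: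
--             inserts.append(state)
--     return inserts[head:][::-1]
-- ===== Notes on version B (the rewrite author's own statement) =====
-- stated objective: faster
-- what changed: Replaces the front-insert/back-delete mutable list with an append-only chronological list plus a lazy head index; the survivors inserts[head:] are reversed once at the end.
import Mathlib
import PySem

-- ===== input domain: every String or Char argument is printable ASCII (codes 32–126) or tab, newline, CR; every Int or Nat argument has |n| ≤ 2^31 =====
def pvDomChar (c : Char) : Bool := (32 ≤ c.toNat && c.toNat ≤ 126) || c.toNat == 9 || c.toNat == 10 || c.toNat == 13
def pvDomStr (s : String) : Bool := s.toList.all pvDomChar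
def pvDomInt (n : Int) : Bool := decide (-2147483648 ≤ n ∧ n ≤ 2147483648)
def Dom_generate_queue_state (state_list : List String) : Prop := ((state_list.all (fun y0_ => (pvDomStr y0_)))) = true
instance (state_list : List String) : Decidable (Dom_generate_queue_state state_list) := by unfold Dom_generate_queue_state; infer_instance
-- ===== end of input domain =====

-- B keeps an append-only chronological list plus a lazy head index instead of mutating front/back; return value only, same values proved equal.
-- ===== PORT A =====
def generate_queue_state (state_list : List String) : List String :=
  state_list.foldl (fun data_structure state =>
    if state == "delete" then
      if data_structure.length == 0 then data_structure
      else data_structure.dropLast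
    else
      state :: data_structure) []

-- ===== PORT B =====
def generate_queue_state_alt (state_list : List String) : List String :=
  let p := state_list.foldl (fun (acc : List String × Nat) state =>
    if state == "delete" then
      if acc.2 < acc.1.length then (acc.1, acc.2 + 1) else acc
    else
      (acc.1 ++ [state], acc.2)) ([], 0)
  ((p.1.drop p.2).reverse)

-- ===== PRECONDITION & SPEC =====
def Spec_generate_queue_state (state_list : List String) (out : List String) : Prop := out = generate_queue_state_alt state_list
instance (state_list : List String) (out : List String) : Decidable (Spec_generate_queue_state state_list out) := by unfold Spec_generate_queue_state; infer_instance

-- ===== CLAIM (what is proved, stated in full; the proofs are below) =====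
def Claim_equal_generate_queue_state : Prop := ∀ (state_list : List String), Dom_generate_queue_state state_list → Spec_generate_queue_state state_list (generate_queue_state state_list)

-- ===== LEMMAS AND PROOFS =====

-- ===== VERDICT (by name: the statement is the Claim_ definition above) =====
lemma gqs_invariant (state_list : List String) (inserts : List String) (head : Nat)
    (hle : head ≤ inserts.length) :
    state_list.foldl (fun data_structure state =>
      if state == "delete" then
        if data_structure.length == 0 then data_structure
        else data_structure.dropLast
      else
        state :: data_structure) ((inserts.drop head).reverse)
    =
    (let p := state_list.foldl (fun (acc : List String × Nat) state =>
      if state == "delete" then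
        if acc.2 < acc.1.length then (acc.1, acc.2 + 1) else acc
      else
        (acc.1 ++ [state], acc.2)) (inserts, head)
     (p.1.drop p.2).reverse) := by
  induction state_list generalizing inserts head with
  | nil => simp
  | cons s rest ih =>
    simp only [List.foldl_cons]
    by_cases hdel : s == "delete"
    · simp only [hdel, if_pos]
      by_cases hlt : head < inserts.length
      · have hne : (inserts.drop head) ≠ [] := by
          intro h; have := List.drop_eq_nil_iff.mp h; omega
        obtain ⟨x, xs, hx⟩ := List.exists_cons_of_ne_nil hne
        have hlen : ((inserts.drop head).reverse).length ≠ 0 := by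
          simp [hx]
        simp only [if_pos hlt]
        rw [if_neg (by simp [hx])]
        have hdrop1 : inserts.drop (head + 1) = xs := by
          rw [← List.drop_drop, hx]; rfl
        have : ((inserts.drop head).reverse).dropLast = (inserts.drop (head + 1)).reverse := by
          rw [hx, hdrop1]; simp
        rw [this]
        exact ih inserts (head + 1) (by omega)
      · have heq : head = inserts.length := by omega
        rw [if_neg hlt]
        have : inserts.drop head = [] := by simp [heq]
        rw [this]
        have h2 := ih inserts head hle
        rw [this] at h2
        simpa using h2
    · simp only [hdel, if_neg, Bool.false_eq_true, not_false_iff]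
      have : s :: (inserts.drop head).reverse = ((inserts ++ [s]).drop head).reverse := by
        rw [List.drop_append_of_le_length hle]
        simp
      rw [this]
      exact ih (inserts ++ [s]) head (by simp; omega)

-- ===== VERDICT (by name: the statement is the Claim_ definition above) =====
theorem generate_queue_state_spec : Claim_equal_generate_queue_state := by
  intro state_list _
  unfold Spec_generate_queue_state generate_queue_state generate_queue_state_alt
  have := gqs_invariant state_list [] 0 (by simp)
  simpa using this
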